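-- pv_equiv track=rewrite | github.com/areejokaili/topic_labelling | support_methods.py | preprocess_y
-- ===== SOURCE A (Python) =====
-- def preprocess_y(y):
--     y_after_append=[]
--     for row in y:
--         labels= row.split(',')
--         labels_append=''
--         for label in labels:
--             label= 'sostok '+ label + ' eostok'
--             labels_append+=label +' '
--         y_after_append.append(labels_append)
--     return y_after_append
-- ===== SOURCE B (Python) =====
-- def preprocess_y(y):
--     return ['sostok ' + row.replace(',', ' eostok sostok ') + ' eostok ' for row in y]
-- ===== Notes on version B (the rewrite author's own statement) =====
-- stated objective: simpler
-- what changed: Replaces the nested split-then-accumulate loops with a single per-row string substitution: replace each ',' with ' eostok sostok ' and wrap the row in 'sostok ' / ' eostok '.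
import Mathlib
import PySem

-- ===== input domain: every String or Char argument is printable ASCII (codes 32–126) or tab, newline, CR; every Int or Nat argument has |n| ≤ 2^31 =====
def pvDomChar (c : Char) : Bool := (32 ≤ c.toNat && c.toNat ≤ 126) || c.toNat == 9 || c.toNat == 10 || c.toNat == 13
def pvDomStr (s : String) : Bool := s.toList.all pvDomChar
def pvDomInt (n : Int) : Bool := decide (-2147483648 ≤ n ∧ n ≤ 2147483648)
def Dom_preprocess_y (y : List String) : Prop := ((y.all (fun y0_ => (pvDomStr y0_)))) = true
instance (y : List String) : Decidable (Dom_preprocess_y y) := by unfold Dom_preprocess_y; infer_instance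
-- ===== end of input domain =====

-- B replaces A's nested split-then-accumulate loops by one per-row string substitution (simpler, same cost).

-- ===== PORT A =====
-- row.split(',') with a nonempty literal separator: split? always returns some here.
def preprocess_y (y : List String) : List String :=
  y.foldl (fun y_after_append row =>
    let labels := (PySem.Str.split? row ",").getD []
    let labels_append := labels.foldl (fun acc label =>
      acc ++ ("sostok " ++ label ++ " eostok") ++ " ") ""
    y_after_append ++ [labels_append]) []

-- ===== PORT B =====
def preprocess_y_alt (y : List String) : List String :=
  y.map (fun row => "sostok " ++ PySem.Str.replace row "," " eostok sostok " ++ " eostok ")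

-- ===== PRECONDITION & SPEC =====
def Spec_preprocess_y (y : List String) (out : List String) : Prop := out = preprocess_y_alt y
instance (y : List String) (out : List String) : Decidable (Spec_preprocess_y y out) := by unfold Spec_preprocess_y; infer_instance

-- ===== CLAIM (what is proved, stated in full; the proofs are below) =====
def Claim_equal_preprocess_y : Prop := ∀ (y : List String), Dom_preprocess_y y → Spec_preprocess_y y (preprocess_y y)

-- ===== LEMMAS AND PROOFS =====

-- single-character replace, structurally
def pvRepl1 (a : Char) (new : List Char) : List Char → List Char
  | [] => []
  | c :: t => if c = a then new ++ pvRepl1 a new t else c :: pvRepl1 a new t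

-- single-character split, as (first piece, remaining pieces)
def pvSp (a : Char) : List Char → List Char × List (List Char)
  | [] => ([], [])
  | c :: t =>
    let p := pvSp a t
    if c = a then ([], p.1 :: p.2) else (c :: p.1, p.2)

theorem replace_go_eq (a : Char) (new : List Char) :
    ∀ (l : List Char) (acc : List Char) (fuel : Nat), l.length ≤ fuel →
      PySem.Chars.replace.go [a] new fuel l acc = acc.reverse ++ pvRepl1 a new l := by
  intro l
  induction l with
  | nil =>
    intro acc fuel _
    cases fuel <;> simp [PySem.Chars.replace.go, pvRepl1]
  | cons c t ih =>
    intro acc fuel h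
    cases fuel with
    | zero => simp at h
    | succ f =>
      simp only [PySem.Chars.replace.go]
      by_cases hc : c = a
      · subst hc
        simp only [List.isPrefixOf]
        rw [if_pos (by simp)]
        simp only [List.length, List.drop]
        rw [ih (new.reverse ++ acc) f (by simpa using Nat.lt_succ_iff.mp (by simpa using h))]
        simp [pvRepl1]
      · rw [if_neg (by simp [List.isPrefixOf_iff_prefix, List.prefix_cons_iff]; exact fun h' => hc h'.symm)]
        rw [ih (c :: acc) f (by simpa using Nat.lt_succ_iff.mp (by simpa using h))]
        simp [pvRepl1, hc]

theorem splitOn_go_eq (a : Char) :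
    ∀ (l cur : List Char) (acc : List (List Char)) (fuel : Nat), l.length < fuel →
      PySem.Chars.splitOn.go [a] fuel l cur acc =
        acc.reverse ++ (cur.reverse ++ (pvSp a l).1) :: (pvSp a l).2 := by
  intro l
  induction l with
  | nil =>
    intro cur acc fuel h
    cases fuel with
    | zero => omega
    | succ f => simp [PySem.Chars.splitOn.go, pvSp]
  | cons c t ih =>
    intro cur acc fuel h
    cases fuel with
    | zero => omega
    | succ f =>
      simp only [PySem.Chars.splitOn.go]
      by_cases hc : c = a
      · subst hc
        rw [if_pos (by simp [List.isPrefixOf])]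
        simp only [List.length, List.drop]
        rw [ih [] (cur.reverse :: acc) f (by simpa using Nat.lt_succ_iff.mp (by simpa using h))]
        simp [pvSp]
      · rw [if_neg (by simp [List.isPrefixOf_iff_prefix, List.prefix_cons_iff]; exact fun h' => hc h'.symm)]
        rw [ih (c :: cur) acc f (by simpa using Nat.lt_succ_iff.mp (by simpa using h))]
        simp [pvSp, hc]

theorem chars_replace_eq (a : Char) (new s : List Char) :
    PySem.Chars.replace s [a] new = pvRepl1 a new s := by
  simp only [PySem.Chars.replace, List.isEmpty]
  rw [replace_go_eq a new s [] s.length le_rfl]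
  simp

theorem chars_splitOn_eq (a : Char) (s : List Char) :
    PySem.Chars.splitOn s [a] = (pvSp a s).1 :: (pvSp a s).2 := by
  simp only [PySem.Chars.splitOn]
  rw [splitOn_go_eq a s [] [] (s.length + 1) (Nat.lt_succ_self _)]
  simp

-- the key per-row identity, at the character-list level
theorem row_key (s : List Char) :
    ((pvSp ',' s).1 :: (pvSp ',' s).2).flatMap
        (fun p => "sostok ".toList ++ p ++ " eostok ".toList) =
      "sostok ".toList ++ pvRepl1 ',' " eostok sostok ".toList s ++ " eostok ".toList := by
  induction s with
  | nil => simp [pvSp, pvRepl1]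
  | cons c t ih =>
    simp only [List.flatMap_cons] at ih
    by_cases hc : c = ','
    · subst hc
      simp only [pvSp, pvRepl1, if_true, List.flatMap_cons]
      rw [ih]
      have h2 : (" eostok ".toList ++ "sostok ".toList) = " eostok sostok ".toList := by decide
      simp only [List.append_nil, ← List.append_assoc]
      rw [← h2]
      simp
    · simp only [pvSp, pvRepl1, if_neg hc, List.flatMap_cons]
      have h3 : (pvSp ',' t).1 ++ " eostok ".toList ++
          List.flatMap (fun p => "sostok ".toList ++ p ++ " eostok ".toList) (pvSp ',' t).2 =
          pvRepl1 ',' " eostok sostok ".toList t ++ " eostok ".toList :=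
        List.append_cancel_left (as := "sostok ".toList) (by simpa [List.append_assoc] using ih)
      simpa [List.append_assoc] using h3

-- the per-row equality at the String level
theorem foldl_toList (ls : List String) (init : String) :
    (ls.foldl (fun acc label => acc ++ ("sostok " ++ label ++ " eostok") ++ " ") init).toList =
      init.toList ++ ls.flatMap (fun l => "sostok ".toList ++ l.toList ++ " eostok ".toList) := by
  induction ls generalizing init with
  | nil => simp
  | cons l t ih =>
    simp only [List.foldl_cons, List.flatMap_cons, ih, String.toList_append]
    have : " eostok".toList ++ " ".toList = " eostok ".toList := by decide
    simp [← this]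

theorem row_eq (row : String) :
    ((PySem.Str.split? row ",").getD []).foldl
        (fun acc label => acc ++ ("sostok " ++ label ++ " eostok") ++ " ") "" =
      "sostok " ++ PySem.Str.replace row "," " eostok sostok " ++ " eostok " := by
  apply String.toList_inj.mp
  rw [foldl_toList]
  simp only [PySem.Str.split?, PySem.Chars.split?, List.isEmpty, String.toList_append,
    PySem.Str.toList_replace]
  have hsep : (",".toList : List Char) = [','] := by decide
  simp only [hsep, Bool.false_eq_true, if_false, Option.map_some, Option.getD_some,
    chars_splitOn_eq, chars_replace_eq]
  have := row_key row.toList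
  simp only [List.flatMap_cons] at this ⊢
  simpa [String.toList_ofList, List.flatMap_map] using this

-- ===== VERDICT (by name: the statement is the Claim_ definition above) =====
theorem preprocess_y_spec : Claim_equal_preprocess_y := by
  intro y hdom
  clear hdom
  unfold Spec_preprocess_y preprocess_y preprocess_y_alt
  induction y using List.reverseRecOn with
  | nil => rfl
  | append_singleton ys row ih =>
    rw [List.foldl_append, List.map_append, ← ih]
    simp only [List.foldl_cons, List.foldl_nil, List.map_cons, List.map_nil]
    congr 1
    exact congrArg (fun z => [z]) (row_eq row)
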